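-- pv_equiv track=rewrite | github.com/goforprodev/small-python-projects | bagels.py | get_hints
-- ===== SOURCE A (Python) =====
-- NUM_OF_DIGITS = 5
--
-- def get_hints(rand , guess):
--     if guess == rand:
--         return "Correct"
--
--     hints = []
--
--     for i in range(NUM_OF_DIGITS):
--         if guess[i] == rand[i]:
--             hints.append("Fermi")
--         elif guess[i] in rand:
--             hints.append("Pico")
--     if len(hints) == 0:
--         return "Bagels"
--     else:
--         hints.sort()
--         return " ".join(hints)
-- ===== SOURCE B (Python) =====
-- NUM_OF_DIGITS = 5
--
-- def get_hints(rand, guess):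
--     if guess == rand:
--         return "Correct"
--
--     def words(i):
--         """Sorted hint words for positions i..4, built directly as a string:
--         a Fermi is prepended, a Pico is appended (Fermis always sort first)."""
--         if i == NUM_OF_DIGITS:
--             return ""
--         rest = words(i + 1)
--         if guess[i] == rand[i]:
--             return "Fermi" if rest == "" else "Fermi " + rest
--         if guess[i] in rand:
--             return "Pico" if rest == "" else rest + " Pico"
--         return rest
--
--     s = words(0)
--     return s if s else "Bagels"
-- ===== Notes on version B (the rewrite author's own statement) =====
-- stated objective: alternative
-- what changed: B replaces A's append-to-list/sort/join pipeline by a recursion over positions that builds the final hint string directly (prepending 'Fermi', appending 'Pico', which keeps the words in sorted order), so no list, no sort and no join are used.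
import Mathlib
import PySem

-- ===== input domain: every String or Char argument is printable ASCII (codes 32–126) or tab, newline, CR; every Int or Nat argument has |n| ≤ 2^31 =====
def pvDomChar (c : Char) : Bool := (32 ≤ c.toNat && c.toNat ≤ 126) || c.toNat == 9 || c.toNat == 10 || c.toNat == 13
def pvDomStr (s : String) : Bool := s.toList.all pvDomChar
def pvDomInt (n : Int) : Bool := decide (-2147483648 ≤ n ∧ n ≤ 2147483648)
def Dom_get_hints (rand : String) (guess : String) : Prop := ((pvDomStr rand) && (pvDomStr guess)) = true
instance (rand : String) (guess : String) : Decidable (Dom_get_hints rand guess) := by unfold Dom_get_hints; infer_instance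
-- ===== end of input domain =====

-- B replaces A's build/sort/join of a hint list by a recursion over the positions that
-- builds the final string directly (prepend "Fermi", append "Pico": sorted order is kept).

-- ===== PORT A =====
-- 'guess[i] in rand' with guess[i] a single char is exactly char membership in rand.
def get_hints (rand : String) (guess : String) : String :=
  if guess = rand then "Correct"
  else
    let hints := (PySem.List.pyRange 0 5 1).foldl
      (fun (hints : List String) (i : Int) =>
        match PySem.List.pyGet? guess.toList i, PySem.List.pyGet? rand.toList i with
        | some gc, some rc =>
            if gc = rc then hints ++ ["Fermi"]
            else if rand.toList.contains gc then hints ++ ["Pico"]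
            else hints
        | _, _ => hints) ([] : List String)
    if hints.length = 0 then "Bagels"
    else PySem.Str.join " " (PySem.List.sorted hints (fun x => x) false)

-- ===== PORT B =====
-- Source B's recursive 'words(i)': hint words for positions i..4, built directly as a string.
-- (On i where indexing would raise in Python — strings shorter than 5, outside Pre_ —
-- the 'none' arm just skips, like A's port.)
def pvWordsB (r g : List Char) (i : Nat) : String :=
  if i < 5 then
    let rest := pvWordsB r g (i + 1)
    match PySem.List.pyGet? g (i : Int) with
    | none => rest
    | some gc =>
      match PySem.List.pyGet? r (i : Int) with
      | none => rest
      | some rc =>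
          if gc = rc then (if rest = "" then "Fermi" else "Fermi " ++ rest)
          else if r.contains gc then (if rest = "" then "Pico" else rest ++ " Pico")
          else rest
  else ""
termination_by 5 - i

def get_hints_alt (rand : String) (guess : String) : String :=
  if guess = rand then "Correct"
  else
    let s := pvWordsB rand.toList guess.toList 0
    if s = "" then "Bagels" else s

-- ===== PRECONDITION & SPEC =====
-- Pre_ excludes exactly the inputs where Python A raises IndexError: guess ≠ rand and
-- one of the strings has fewer than 5 characters (B's recursion raises there too).
def Pre_get_hints (rand : String) (guess : String) : Prop :=
  guess = rand ∨ (5 ≤ rand.toList.length ∧ 5 ≤ guess.toList.length)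
instance (rand : String) (guess : String) : Decidable (Pre_get_hints rand guess) := by
  unfold Pre_get_hints; infer_instance
def pvWitness_get_hints : String × String := ("12345", "13525")

def Spec_get_hints (rand : String) (guess : String) (out : String) : Prop := out = get_hints_alt rand guess
instance (rand : String) (guess : String) (out : String) : Decidable (Spec_get_hints rand guess out) := by unfold Spec_get_hints; infer_instance

-- ===== CLAIM (what is proved, stated in full; the proofs are below) =====
def Claim_equal_get_hints : Prop := ∀ (rand : String) (guess : String), Dom_get_hints rand guess → Pre_get_hints rand guess → Spec_get_hints rand guess (get_hints rand guess)

-- ===== LEMMAS AND PROOFS =====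

-- the hint (as a 0/1-element list) that position i contributes, for both programs
def pvEmit (r g : List Char) (i : Int) : List String :=
  match PySem.List.pyGet? g i, PySem.List.pyGet? r i with
  | some gc, some rc =>
      if gc = rc then ["Fermi"] else if r.contains gc then ["Pico"] else []
  | _, _ => []

-- the canonical sorted hint list: all Fermis, then all Picos
def pvCanon (l : List String) : List String :=
  List.replicate (l.count "Fermi") "Fermi" ++ List.replicate (l.count "Pico") "Pico"

lemma pvFoldA (r g : List Char) (L : List Int) (h0 : List String) :
    L.foldl
      (fun (hints : List String) (i : Int) =>
        match PySem.List.pyGet? g i, PySem.List.pyGet? r i with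
        | some gc, some rc =>
            if gc = rc then hints ++ ["Fermi"]
            else if r.contains gc then hints ++ ["Pico"]
            else hints
        | _, _ => hints) h0
    = h0 ++ L.flatMap (pvEmit r g) := by
  have hstep :
      (fun (hints : List String) (i : Int) =>
        match PySem.List.pyGet? g i, PySem.List.pyGet? r i with
        | some gc, some rc =>
            if gc = rc then hints ++ ["Fermi"]
            else if r.contains gc then hints ++ ["Pico"]
            else hints
        | _, _ => hints)
      = (fun (hints : List String) (i : Int) => hints ++ pvEmit r g i) := by
    funext hints i
    unfold pvEmit
    cases PySem.List.pyGet? g i <;> cases PySem.List.pyGet? r i <;> simp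
    split_ifs <;> simp
  rw [hstep, PySem.List.foldl_append_eq_flatMap]

lemma pvEmitMem (r g : List Char) (L : List Int) (x : String)
    (hx : x ∈ L.flatMap (pvEmit r g)) : x = "Fermi" ∨ x = "Pico" := by
  rw [List.mem_flatMap] at hx
  obtain ⟨i, _, hmem⟩ := hx
  unfold pvEmit at hmem
  cases hg : PySem.List.pyGet? g i <;> cases hr : PySem.List.pyGet? r i <;>
    rw [hg, hr] at hmem <;> simp at hmem
  split_ifs at hmem <;> simp at hmem <;> simp [hmem]

lemma pvLenCount (l : List String) (h : ∀ x ∈ l, x = "Fermi" ∨ x = "Pico") :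
    l.length = l.count "Fermi" + l.count "Pico" := by
  induction l with
  | nil => simp
  | cons x l ih =>
    have hx := h x (by simp)
    have := ih (fun y hy => h y (by simp [hy]))
    rcases hx with h1 | h1 <;> subst h1 <;> simp [this] <;> omega

lemma pvSorted (l : List String) (h : ∀ x ∈ l, x = "Fermi" ∨ x = "Pico") :
    PySem.List.sorted l (fun x => x) false = pvCanon l := by
  unfold pvCanon
  apply PySem.List.sorted_id_eq_of_perm_of_pairwise
  · rw [List.perm_iff_count]
    intro a
    rw [List.count_append, List.count_replicate, List.count_replicate]
    by_cases hF : a = "Fermi"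
    · subst hF; simp
    · by_cases hP : a = "Pico"
      · subst hP; simp
      · have hne : a ∉ l := fun hm => by rcases h a hm with h1 | h1 <;> simp [h1] at hF hP
        simp [Ne.symm hF, Ne.symm hP, List.count_eq_zero_of_not_mem hne]
  · rw [List.pairwise_append]
    refine ⟨List.pairwise_replicate.mpr (Or.inr le_rfl),
            List.pairwise_replicate.mpr (Or.inr le_rfl), ?_⟩
    intro x hx y hy
    rw [List.eq_of_mem_replicate hx, List.eq_of_mem_replicate hy,
        String.le_iff_toList_le]
    decide

-- the joined canonical string for f Fermis and p Picos
def pvJ (f p : Nat) : String :=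
  PySem.Str.join " " (List.replicate f "Fermi" ++ List.replicate p "Pico")

lemma pvJ_prepF : ∀ f < 5, ∀ p < 5, f + p ≤ 4 →
    (if pvJ f p = "" then "Fermi" else "Fermi " ++ pvJ f p) = pvJ (f + 1) p := by decide

lemma pvJ_appP : ∀ f < 5, ∀ p < 5, f + p ≤ 4 →
    (if pvJ f p = "" then "Pico" else pvJ f p ++ " Pico") = pvJ f (p + 1) := by decide

lemma pvJ_empty : ∀ f < 6, ∀ p < 6, (pvJ f p = "" ↔ f = 0 ∧ p = 0) := by decide

lemma pvCanon_join (l : List String) :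
    PySem.Str.join " " (pvCanon l) = pvJ (l.count "Fermi") (l.count "Pico") := rfl

-- main invariant of B's recursion
lemma pvWordsB_eq (r g : List Char) : ∀ (n i : Nat), i + n = 5 →
    pvWordsB r g i
      = pvJ (((PySem.List.pyRange i 5 1).flatMap (pvEmit r g)).count "Fermi")
            (((PySem.List.pyRange i 5 1).flatMap (pvEmit r g)).count "Pico")
    ∧ ((PySem.List.pyRange i 5 1).flatMap (pvEmit r g)).length ≤ n := by
  intro n
  induction n with
  | zero =>
    intro i hi
    have h5 : i = 5 := by omega
    subst h5
    rw [pvWordsB]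
    norm_num [PySem.List.pyRange]
    decide
  | succ n ih =>
    intro i hi
    have hlt : i < 5 := by omega
    have hrange : PySem.List.pyRange (i : Int) 5 1 = (i : Int) :: PySem.List.pyRange ((i : Int) + 1) 5 1 := by
      apply PySem.List.pyRange_one_cons; omega
    obtain ⟨ihv, ihl⟩ := ih (i + 1) (by omega)
    have hcast : ((i : Int) + 1) = ((i + 1 : Nat) : Int) := by push_cast; ring
    set L := (PySem.List.pyRange ((i + 1 : Nat) : Int) 5 1).flatMap (pvEmit r g) with hL
    set f := L.count "Fermi" with hf
    set p := L.count "Pico" with hp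
    have hfp : f + p = L.length :=
      (pvLenCount L (fun x hx => pvEmitMem r g _ x hx)).symm
    have hfb : f < 5 := by
      have : f ≤ L.length := List.count_le_length
      omega
    have hpb : p < 5 := by
      have : p ≤ L.length := List.count_le_length
      omega
    have hsum : f + p ≤ 4 := by omega
    rw [pvWordsB, if_pos hlt, hrange]
    simp only [List.flatMap_cons, List.count_append, List.length_append, hcast, ← hL]
    unfold pvEmit
    cases hg : PySem.List.pyGet? g (i : Int) with
    | none =>
      cases hr : PySem.List.pyGet? r (i : Int) <;>
        exact ⟨by simpa using ihv, by simp; omega⟩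
    | some gc =>
      cases hr : PySem.List.pyGet? r (i : Int) with
      | none => exact ⟨by simpa using ihv, by simp; omega⟩
      | some rc =>
      by_cases heq : gc = rc
      · simp only [heq, ihv]
        constructor
        · have := pvJ_prepF f hfb p hpb hsum
          simpa [Nat.add_comm] using this
        · simp; omega
      · by_cases hin : r.contains gc
        · simp only [if_neg heq, if_pos hin, ihv]
          constructor
          · have := pvJ_appP f hfb p hpb hsum
            simpa [Nat.add_comm] using this
          · simp; omega
        · simp only [if_neg heq, if_neg hin, ihv]
          exact ⟨by rw [hf, hp]; simp, by simp; omega⟩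

-- ===== VERDICT (by name: the statement is the Claim_ definition above) =====
theorem get_hints_spec : Claim_equal_get_hints := by
  intro rand guess _ _
  unfold Spec_get_hints get_hints get_hints_alt
  by_cases hcr : guess = rand
  · simp [hcr]
  · simp only [if_neg hcr]
    rw [pvFoldA rand.toList guess.toList]
    simp only [List.nil_append]
    obtain ⟨hv, hl⟩ := pvWordsB_eq rand.toList guess.toList 5 0 (by omega)
    simp only [Nat.cast_zero] at hv hl
    set L := (PySem.List.pyRange 0 5 1).flatMap (pvEmit rand.toList guess.toList) with hL
    have hmem : ∀ x ∈ L, x = "Fermi" ∨ x = "Pico" := fun x hx => pvEmitMem _ _ _ x hx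
    have hlen := pvLenCount L hmem
    have hfb : L.count "Fermi" < 6 := by
      have : L.count "Fermi" ≤ L.length := List.count_le_length; omega
    have hpb : L.count "Pico" < 6 := by
      have : L.count "Pico" ≤ L.length := List.count_le_length; omega
    have hemp := pvJ_empty (L.count "Fermi") hfb (L.count "Pico") hpb
    rw [hv]
    by_cases hz : L.count "Fermi" = 0 ∧ L.count "Pico" = 0
    · rw [if_pos (by omega), if_pos (hemp.mpr hz)]
    · rw [if_neg (by omega), if_neg (fun h => hz (hemp.mp h)),
          pvSorted L hmem, pvCanon_join]
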